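-- pv_equiv track=rewrite | github.com/MrBrantCode/unitest_baseline | mut_generate/mist_train_cf/cf_60049/solution.py | spynum
-- ===== SOURCE A (Python) =====
-- def spynum(n, sm=0, pd=1):
--     if n == 0:
--         return sm == pd
--     else:
--         rem = n % 10
--         sm += rem
--         pd *= rem
--         return spynum(n//10, sm, pd)
-- ===== SOURCE B (Python) =====
-- def spynum(n, sm=0, pd=1):
--     digits = []
--     while n != 0:
--         digits.append(n % 10)
--         n //= 10
--     prod = pd
--     for d in digits:
--         prod *= d
--     return sm + sum(digits) == prod
-- ===== Notes on version B (the rewrite author's own statement) =====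
-- stated objective: alternative
-- what changed: Instead of a single recursive pass threading sum/product accumulators, B first materialises the digit list, then computes the sum with the built-in sum() and the product with a separate loop, comparing once at the end.
import Mathlib
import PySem

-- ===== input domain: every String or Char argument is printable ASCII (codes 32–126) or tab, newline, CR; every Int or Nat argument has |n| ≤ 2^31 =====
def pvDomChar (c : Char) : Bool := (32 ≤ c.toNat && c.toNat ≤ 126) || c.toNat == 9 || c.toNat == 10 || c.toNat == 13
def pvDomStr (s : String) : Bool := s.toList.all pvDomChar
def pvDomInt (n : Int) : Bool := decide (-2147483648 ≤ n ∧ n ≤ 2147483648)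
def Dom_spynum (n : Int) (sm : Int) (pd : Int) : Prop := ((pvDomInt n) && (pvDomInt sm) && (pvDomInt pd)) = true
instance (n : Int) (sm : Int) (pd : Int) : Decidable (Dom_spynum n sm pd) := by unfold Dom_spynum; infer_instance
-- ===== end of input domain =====

-- B replaces A's accumulator-threading recursion with staged passes: build the digit list, then sum and product separately (alternative decomposition; same cost).


-- ===== PORT A =====
-- Literal port of A's recursion; the 'if h : 0 < n' guard only makes the (diverging) negative case total.
def spynum (n : Int) (sm : Int) (pd : Int) : Bool :=
  if n = 0 then sm == pd
  else
    let rem := PySem.Int.mod n 10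
    if h : 0 < n then
      spynum (PySem.Int.floordiv n 10) (sm + rem) (pd * rem)
    else false
termination_by n.toNat
decreasing_by
  have h10 : PySem.Int.floordiv n 10 = n / 10 := PySem.Int.floordiv_eq_ediv_of_pos (by omega)
  have h1 : n / 10 < n := (Int.ediv_lt_iff_lt_mul (by norm_num)).mpr (by omega)
  have h2 : 0 ≤ n / 10 := Int.ediv_nonneg (le_of_lt h) (by omega)
  rw [h10]; omega

-- ===== PORT B =====
-- The first while loop of Source B: collect the digits (least significant first); 'if h : 0 < n' totalises the hanging negative case.
def spynumDigits (n : Int) : List Int :=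
  if n = 0 then []
  else if h : 0 < n then
    PySem.Int.mod n 10 :: spynumDigits (PySem.Int.floordiv n 10)
  else []
termination_by n.toNat
decreasing_by
  have h10 : PySem.Int.floordiv n 10 = n / 10 := PySem.Int.floordiv_eq_ediv_of_pos (by omega)
  have h1 : n / 10 < n := (Int.ediv_lt_iff_lt_mul (by norm_num)).mpr (by omega)
  have h2 : 0 ≤ n / 10 := Int.ediv_nonneg (le_of_lt h) (by omega)
  rw [h10]; omega

-- staged passes: sum() builtin, then the product loop, then one comparison
def spynum_alt (n : Int) (sm : Int) (pd : Int) : Bool :=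
  let digits := spynumDigits n
  let prod := digits.foldl (· * ·) pd
  (sm + digits.sum) == prod

-- ===== PRECONDITION & SPEC =====
-- Pre_ excludes n < 0: there A's recursion never reaches 0 (Python raises RecursionError) and B's digit loop would not terminate.
def Pre_spynum (n : Int) (sm : Int) (pd : Int) : Prop := 0 ≤ n
instance (n : Int) (sm : Int) (pd : Int) : Decidable (Pre_spynum n sm pd) := by unfold Pre_spynum; infer_instance
def pvWitness_spynum : Int × Int × Int := (1124, 0, 1)
def Spec_spynum (n : Int) (sm : Int) (pd : Int) (out : Bool) : Prop := out = spynum_alt n sm pd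
instance (n : Int) (sm : Int) (pd : Int) (out : Bool) : Decidable (Spec_spynum n sm pd out) := by unfold Spec_spynum; infer_instance

-- ===== CLAIM =====
def Claim_equal_spynum : Prop := ∀ (n : Int) (sm : Int) (pd : Int), Dom_spynum n sm pd → Pre_spynum n sm pd → Spec_spynum n sm pd (spynum n sm pd)

-- ===== LEMMAS AND PROOFS =====
theorem floordiv10_bounds (n : Int) (h : 0 < n) :
    PySem.Int.floordiv n 10 < n ∧ 0 ≤ PySem.Int.floordiv n 10 := by
  have h10 : PySem.Int.floordiv n 10 = n / 10 := PySem.Int.floordiv_eq_ediv_of_pos (by omega)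
  have h1 : n / 10 < n := (Int.ediv_lt_iff_lt_mul (by norm_num)).mpr (by omega)
  have h2 : 0 ≤ n / 10 := Int.ediv_nonneg (le_of_lt h) (by omega)
  omega

theorem spynum_eq_digits (N : Nat) : ∀ n sm pd : Int, n.toNat ≤ N → 0 ≤ n →
    spynum n sm pd = ((sm + (spynumDigits n).sum) == (spynumDigits n).foldl (· * ·) pd) := by
  induction N with
  | zero =>
      intro n sm pd hN hn
      have h0 : n = 0 := by omega
      subst h0
      rw [spynum, spynumDigits]; simp
  | succ N ih =>
      intro n sm pd hN hn
      by_cases h : n = 0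
      · subst h; rw [spynum, spynumDigits]; simp
      · have hpos : 0 < n := by omega
        obtain ⟨hlt, hge⟩ := floordiv10_bounds n hpos
        rw [spynum, if_neg h, dif_pos hpos, spynumDigits, if_neg h, dif_pos hpos]
        rw [ih _ _ _ (by omega) hge]
        simp [List.sum_cons, add_assoc]

-- ===== VERDICT =====
theorem spynum_spec : Claim_equal_spynum := by
  intro n sm pd _ hn
  unfold Spec_spynum spynum_alt
  exact spynum_eq_digits n.toNat n sm pd le_rfl hn
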